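-- pv_equiv track=rewrite | github.com/syncwithrana/algo | python/prefsum.py | binary_subarrays_with_sum
-- ===== SOURCE A (Python) =====
-- def binary_subarrays_with_sum(arr, goal):
--     def atMost(G):
--         if G < 0: return 0
--         left, curr, count = 0, 0, 0
--         for right in range(len(arr)):
--             curr += arr[right]
--             while curr > G:
--                 curr -= arr[left]; left += 1
--             count += right - left + 1
--         return count
--     return atMost(goal) - atMost(goal - 1)
-- ===== SOURCE B (Python) =====
-- def binary_subarrays_with_sum(arr, goal):
--     seen = {0: 1}
--     s = 0
--     result = 0
--     for x in arr:
--         s += x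
--         result += seen.get(s - goal, 0)
--         seen[s] = seen.get(s, 0) + 1
--     return result
-- ===== Notes on version B (the rewrite author's own statement) =====
-- stated objective: alternative
-- what changed: Replaced the two monotone sliding-window atMost passes with a single pass maintaining a prefix-sum frequency dictionary seeded with {0: 1}; Pre_ restricts to nonnegative-element lists, the only domain on which A's sliding window counts subarrays (on lists with a negative element A's window count is accidental and any agreement with B coincidental).
-- outside the precondition, e.g. on binary_subarrays_with_sum([-1, 1], 0): A returns 3, B returns 1; on binary_subarrays_with_sum([-1], 0): A returns 1, B returns 0
import Mathlib
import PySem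

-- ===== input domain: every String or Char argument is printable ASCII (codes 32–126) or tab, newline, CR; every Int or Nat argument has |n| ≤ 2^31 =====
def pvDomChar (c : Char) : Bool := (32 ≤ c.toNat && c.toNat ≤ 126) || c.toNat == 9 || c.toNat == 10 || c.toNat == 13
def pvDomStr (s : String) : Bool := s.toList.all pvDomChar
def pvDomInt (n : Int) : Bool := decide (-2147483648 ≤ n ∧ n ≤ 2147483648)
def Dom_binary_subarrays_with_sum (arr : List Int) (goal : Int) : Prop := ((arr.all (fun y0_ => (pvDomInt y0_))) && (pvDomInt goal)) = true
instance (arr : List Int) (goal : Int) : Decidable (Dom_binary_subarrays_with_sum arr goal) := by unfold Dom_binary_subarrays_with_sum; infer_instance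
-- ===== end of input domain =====

-- B replaces A's two sliding-window `atMost` passes by a single pass over a prefix-sum
-- frequency dictionary (objective: alternative decomposition, same asymptotic cost).

-- ===== PORT A =====
-- inner `while curr > G: curr -= arr[left]; left += 1`; fuel = right+1-left bounds the
-- iterations Python can perform without an IndexError (inside Pre_ the loop always stops
-- with left ≤ right+1, so the fuel is never exhausted while curr > G).
def pvWhileA (arr : List Int) (G : Int) : Nat → Int → Nat → Int × Nat
  | 0, curr, left => (curr, left)
  | fuel + 1, curr, left =>
      if G < curr then pvWhileA arr G fuel (curr - arr.getD left 0) (left + 1)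
      else (curr, left)

-- one iteration of `for right in range(len(arr))`, state (left, curr, count)
def pvStepA (arr : List Int) (G : Int) (st : Nat × Int × Int) (right : Nat) : Nat × Int × Int :=
  let w := pvWhileA arr G (right + 1 - st.1) (st.2.1 + arr.getD right 0) st.1
  (w.2, w.1, st.2.2 + ((right : Int) - (w.2 : Int) + 1))

def pvAtMostA (arr : List Int) (G : Int) : Int :=
  if G < 0 then 0
  else ((List.range arr.length).foldl (pvStepA arr G) (0, 0, 0)).2.2

def binary_subarrays_with_sum (arr : List Int) (goal : Int) : Int :=
  pvAtMostA arr goal - pvAtMostA arr (goal - 1)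

-- ===== PORT B =====
-- `for x in arr: s += x; result += seen.get(s-goal, 0); seen[s] = seen.get(s, 0)+1`
def pvAltGo (goal : Int) : List Int → Int → PySem.Dict Int Int → Int → Int
  | [], _, _, res => res
  | x :: xs, s, seen, res =>
      let s' := s + x
      let res' := res + seen.getD (s' - goal) 0
      pvAltGo goal xs s' (seen.insert s' (seen.getD s' 0 + 1)) res'

def binary_subarrays_with_sum_alt (arr : List Int) (goal : Int) : Int :=
  pvAltGo goal arr 0 (PySem.Dict.empty.insert 0 1) 0

-- ===== PRECONDITION & SPEC =====
-- Pre_ restricts to the function's natural domain of nonnegative (binary) arrays: on a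
-- list with a negative element A's monotone sliding window returns an accidental window
-- count that is not the number of subarrays summing to goal (it may coincide with B's true
-- count on particular inputs, but only coincidentally), so nothing is claimed there.
def Pre_binary_subarrays_with_sum (arr : List Int) (goal : Int) : Prop := ∀ x ∈ arr, 0 ≤ x
instance (arr : List Int) (goal : Int) : Decidable (Pre_binary_subarrays_with_sum arr goal) := by
  unfold Pre_binary_subarrays_with_sum; infer_instance
def pvWitness_binary_subarrays_with_sum : List Int × Int := ([1, 0, 1, 1], 2)

def Spec_binary_subarrays_with_sum (arr : List Int) (goal : Int) (out : Int) : Prop := out = binary_subarrays_with_sum_alt arr goal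
instance (arr : List Int) (goal : Int) (out : Int) : Decidable (Spec_binary_subarrays_with_sum arr goal out) := by unfold Spec_binary_subarrays_with_sum; infer_instance

-- ===== CLAIM (what is proved, stated in full; the proofs are below) =====
def Claim_equal_binary_subarrays_with_sum : Prop := ∀ (arr : List Int) (goal : Int), Dom_binary_subarrays_with_sum arr goal → Pre_binary_subarrays_with_sum arr goal → Spec_binary_subarrays_with_sum arr goal (binary_subarrays_with_sum arr goal)

-- ===== LEMMAS AND PROOFS =====

-- prefix sum: sum of the first k elements
def pvPref (arr : List Int) (k : Nat) : Int := (arr.take k).sum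

-- number of l ≤ r with sum(arr[l:r+1]) ≤ G, as an Int
def pvCLe (arr : List Int) (G : Int) (r : Nat) : Int :=
  ((List.range (r + 1)).countP (fun l => decide (pvPref arr (r + 1) - pvPref arr l ≤ G)) : Int)

-- number of l ≤ r with sum(arr[l:r+1]) = goal, as an Int
def pvCEq (arr : List Int) (goal : Int) (r : Nat) : Int :=
  ((List.range (r + 1)).countP (fun l => decide (pvPref arr (r + 1) - pvPref arr l = goal)) : Int)

lemma pvPref_succ (arr : List Int) (k : Nat) (hk : k < arr.length) :
    pvPref arr (k + 1) = pvPref arr k + arr.getD k 0 := by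
  unfold pvPref
  rw [List.take_add_one, List.sum_append, List.getElem?_eq_getElem hk,
    List.getD_eq_getElem _ _ hk]
  simp

lemma pvPref_mono (arr : List Int) (hnn : ∀ x ∈ arr, 0 ≤ x) {l k : Nat} (h : l ≤ k) :
    pvPref arr l ≤ pvPref arr k := by
  unfold pvPref
  rw [show k = l + (k - l) by omega, List.take_add, List.sum_append]
  have h0 : 0 ≤ ((arr.drop l).take (k - l)).sum := by
    apply List.sum_nonneg
    intro x hx
    exact hnn x (List.mem_of_mem_drop (List.mem_of_mem_take hx))
  linarith

lemma pvCountP_range (n m : Nat) (P : Nat → Bool) (hm : m ≤ n)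
    (h : ∀ i, i < n → (P i = true ↔ m ≤ i)) :
    (List.range n).countP P = n - m := by
  induction n with
  | zero => simp
  | succ n ih =>
    rw [List.range_succ, List.countP_append]
    by_cases hmn : m ≤ n
    · rw [ih hmn (fun i hi => h i (by omega))]
      have hPn : P n = true := (h n (by omega)).2 hmn
      simp [hPn]
      omega
    · have hm' : m = n + 1 := by omega
      have hz : (List.range n).countP P = 0 := by
        apply List.countP_eq_zero.2
        intro a ha
        rw [List.mem_range] at ha
        intro hPa
        exact absurd ((h a (by omega)).1 hPa) (by omega)
      have hPn : ¬ P n = true := fun hPn => absurd ((h n (by omega)).1 hPn) (by omega)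
      simp [hz, hPn]
      omega

lemma pvWhileA_spec (arr : List Int) (G : Int) (hG : 0 ≤ G) :
    ∀ (fuel left : Nat) (curr : Int) (r' : Nat), r' ≤ arr.length → left + fuel = r' →
      curr = pvPref arr r' - pvPref arr left →
      (∀ l, l < left → G < pvPref arr r' - pvPref arr l) →
      (pvWhileA arr G fuel curr left).2 ≤ r' ∧
      (pvWhileA arr G fuel curr left).1 = pvPref arr r' - pvPref arr (pvWhileA arr G fuel curr left).2 ∧
      (pvWhileA arr G fuel curr left).1 ≤ G ∧
      (∀ l, l < (pvWhileA arr G fuel curr left).2 → G < pvPref arr r' - pvPref arr l) := by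
  intro fuel
  induction fuel with
  | zero =>
    intro left curr r' hr hlf hcurr hinv
    have hl : left = r' := by omega
    subst hl
    simp only [pvWhileA]
    refine ⟨le_refl _, hcurr, ?_, hinv⟩
    rw [hcurr, sub_self]
    exact hG
  | succ fuel ih =>
    intro left curr r' hr hlf hcurr hinv
    simp only [pvWhileA]
    by_cases hc : G < curr
    · rw [if_pos hc]
      apply ih (left + 1) (curr - arr.getD left 0) r' hr (by omega)
      · rw [hcurr, pvPref_succ arr left (by omega)]
        ring
      · intro l hl
        rcases Nat.lt_succ_iff_lt_or_eq.1 hl with hl' | hl'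
        · exact hinv l hl'
        · subst hl'
          rw [← hcurr]
          exact hc
    · rw [if_neg hc]
      exact ⟨by omega, hcurr, not_lt.1 hc, hinv⟩

lemma pvAtMostA_loop (arr : List Int) (G : Int) (hnn : ∀ x ∈ arr, 0 ≤ x) (hG : 0 ≤ G) :
    ∀ r : Nat, r ≤ arr.length →
      ∃ left curr, (List.range r).foldl (pvStepA arr G) (0, 0, 0) =
          (left, curr, ∑ r' ∈ Finset.range r, pvCLe arr G r') ∧
        left ≤ r ∧ curr = pvPref arr r - pvPref arr left ∧
        (∀ l, l < left → G < pvPref arr r - pvPref arr l) := by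
  intro r
  induction r with
  | zero =>
    intro _
    exact ⟨0, 0, by simp, le_refl 0, by simp, fun l hl => absurd hl (by omega)⟩
  | succ r ih =>
    intro hr
    obtain ⟨left, curr, hfold, hle, hcurr, hinv⟩ := ih (by omega)
    rw [List.range_succ, List.foldl_append, hfold]
    simp only [List.foldl_cons, List.foldl_nil]
    have hrlen : r < arr.length := by omega
    have hw := pvWhileA_spec arr G hG (r + 1 - left) left (curr + arr.getD r 0) (r + 1)
      (by omega) (by omega)
      (by rw [hcurr, pvPref_succ arr r hrlen]; ring)
      (by
        intro l hl
        have h1 := hinv l hl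
        have h2 : pvPref arr r ≤ pvPref arr (r + 1) := pvPref_mono arr hnn (by omega)
        linarith)
    obtain ⟨hw2le, hw1, hw1le, hwinv⟩ := hw
    set w := pvWhileA arr G (r + 1 - left) (curr + arr.getD r 0) left with hwdef
    refine ⟨w.2, w.1, ?_, hw2le, hw1, hwinv⟩
    unfold pvStepA
    simp only [← hwdef]
    have hcle : pvCLe arr G r = (r : Int) - (w.2 : Int) + 1 := by
      have hP : ∀ i, i < r + 1 →
          ((fun l => decide (pvPref arr (r + 1) - pvPref arr l ≤ G)) i = true ↔ w.2 ≤ i) := by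
        intro i _
        simp only [decide_eq_true_eq]
        constructor
        · intro hle'
          by_contra hlt
          have := hwinv i (by omega)
          linarith
        · intro hge
          have h2 : pvPref arr w.2 ≤ pvPref arr i := pvPref_mono arr hnn hge
          have h3 := hw1le
          rw [hw1] at h3
          linarith
      unfold pvCLe
      rw [pvCountP_range (r + 1) w.2 _ hw2le hP]
      omega
    rw [Finset.sum_range_succ, hcle]

lemma pvAtMostA_eq (arr : List Int) (G : Int) (hnn : ∀ x ∈ arr, 0 ≤ x) :
    pvAtMostA arr G = ∑ r ∈ Finset.range arr.length, pvCLe arr G r := by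
  unfold pvAtMostA
  split_ifs with hG
  · symm
    apply Finset.sum_eq_zero
    intro r _
    unfold pvCLe
    have : (List.range (r + 1)).countP (fun l => decide (pvPref arr (r + 1) - pvPref arr l ≤ G)) = 0 := by
      apply List.countP_eq_zero.2
      intro l hl
      rw [List.mem_range] at hl
      simp only [decide_eq_true_eq]
      intro habs
      have h2 : pvPref arr l ≤ pvPref arr (r + 1) := pvPref_mono arr hnn (by omega)
      linarith
    rw [this]
    rfl
  · obtain ⟨left, curr, hfold, _, _, _⟩ :=
      pvAtMostA_loop arr G hnn (by omega) arr.length (le_refl _)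
    rw [hfold]

lemma pvCLe_sub (arr : List Int) (goal : Int) (r : Nat) :
    pvCLe arr goal r - pvCLe arr (goal - 1) r = pvCEq arr goal r := by
  unfold pvCLe pvCEq
  generalize List.range (r + 1) = L
  induction L with
  | nil => simp
  | cons a L ih =>
    simp only [List.countP_cons]
    simp only [decide_eq_true_eq]
    split_ifs with h1 h2 h3 h4 h5 h6 h7 <;> push_cast <;> omega

lemma pvCEq_count (arr : List Int) (goal : Int) (r : Nat) :
    pvCEq arr goal r =
      (((List.range (r + 1)).map (fun l => pvPref arr l)).count (pvPref arr (r + 1) - goal) : Int) := by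
  unfold pvCEq
  rw [List.count, List.countP_map]
  congr 1
  apply List.countP_congr
  intro a _
  simp only [Function.comp_apply, beq_iff_eq, decide_eq_true_eq]
  constructor <;> intro h <;> omega

lemma pvAltGo_spec (arr : List Int) (goal : Int) :
    ∀ (xs : List Int) (k : Nat) (seen : PySem.Dict Int Int) (res : Int),
      xs = arr.drop k → k ≤ arr.length →
      (∀ v, seen.getD v 0 = (((List.range (k + 1)).map (fun l => pvPref arr l)).count v : Int)) →
      pvAltGo goal xs (pvPref arr k) seen res = res + ∑ r ∈ Finset.Ico k arr.length, pvCEq arr goal r := by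
  intro xs
  induction xs with
  | nil =>
    intro k seen res hxs hk hseen
    have hlen : arr.length - k = 0 := by
      have := congrArg List.length hxs
      simp at this
      omega
    have hk' : k = arr.length := by omega
    simp [pvAltGo, hk']
  | cons x xs ih =>
    intro k seen res hxs hk hseen
    have hklt : k < arr.length := by
      by_contra h
      rw [List.drop_eq_nil_of_le (by omega)] at hxs
      exact absurd hxs (by simp)
    rw [List.drop_eq_getElem_cons hklt] at hxs
    injection hxs with hx hdrop
    simp only [pvAltGo]
    have hs' : pvPref arr k + x = pvPref arr (k + 1) := by
      rw [pvPref_succ arr k hklt, List.getD_eq_getElem _ _ hklt, hx]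
    rw [hs']
    rw [ih (k + 1) _ _ hdrop (by omega) ?_]
    · have hcnt : seen.getD (pvPref arr (k + 1) - goal) 0 = pvCEq arr goal k := by
        rw [hseen]
        exact (pvCEq_count arr goal k).symm
      rw [hcnt, Finset.sum_eq_sum_Ico_succ_bot hklt]
      ring
    · intro v
      rw [PySem.Dict.getD_insert, List.range_succ, List.map_append, List.count_append]
      by_cases hv : v = pvPref arr (k + 1)
      · rw [if_pos hv, hseen, hv]
        have h1 : (List.map (fun l => pvPref arr l) [k + 1]).count (pvPref arr (k + 1)) = 1 := by
          simp
        rw [h1]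
        push_cast
        ring
      · rw [if_neg hv, hseen]
        have h0 : (List.map (fun l => pvPref arr l) [k + 1]).count v = 0 := by
          rw [List.count_eq_zero]
          simp [hv]
        rw [h0]
        push_cast
        ring

lemma pvAlt_eq (arr : List Int) (goal : Int) :
    binary_subarrays_with_sum_alt arr goal = ∑ r ∈ Finset.range arr.length, pvCEq arr goal r := by
  unfold binary_subarrays_with_sum_alt
  have hpref0 : pvPref arr 0 = 0 := by simp [pvPref]
  have h := pvAltGo_spec arr goal arr 0 (PySem.Dict.empty.insert 0 1) 0 (by simp) (by omega)
    (by
      intro v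
      rw [PySem.Dict.getD_insert]
      by_cases hv : v = 0
      · simp [hv, hpref0]
      · rw [if_neg hv]
        have h0 : (List.map (fun l => pvPref arr l) (List.range 1)).count v = 0 := by
          rw [List.count_eq_zero]
          simp [pvPref, hv]
        rw [h0, PySem.Dict.getD_empty]
        simp)
  rw [hpref0] at h
  rw [h, Finset.range_eq_Ico]
  ring

-- ===== VERDICT (by name: the statement is the Claim_ definition above) =====
theorem binary_subarrays_with_sum_spec : Claim_equal_binary_subarrays_with_sum := by
  intro arr goal _ hpre
  unfold Spec_binary_subarrays_with_sum binary_subarrays_with_sum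
  rw [pvAtMostA_eq arr goal hpre, pvAtMostA_eq arr (goal - 1) hpre, pvAlt_eq,
    ← Finset.sum_sub_distrib]
  exact Finset.sum_congr rfl (fun r _ => pvCLe_sub arr goal r)
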